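-- pv_equiv track=rewrite | github.com/nawatc/bridge_system | porter_bridges/porter_bridges.py | deck_list_result
-- ===== SOURCE A (Python) =====
-- def generate_desk_list():
--     """
--     Return list of full desk
--     """
--
--     """
--     # get list by implemented.
--     num = ["A","K","Q","J","T","9","8","7","6","5","4","3","2"]
--     suit = ["s","h","d","c"]
--     desk = []
--
--     for i in suit:
--         for j in num:
--             desk.append(j+i)
--     """
--
--     # get list by declear variable
--     desk = ['As', 'Ks', 'Qs', 'Js', 'Ts', '9s', '8s', '7s', '6s', '5s', '4s', '3s', '2s'
--           , 'Ah', 'Kh', 'Qh', 'Jh', 'Th', '9h', '8h', '7h', '6h', '5h', '4h', '3h', '2h'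
--           , 'Ad', 'Kd', 'Qd', 'Jd', 'Td', '9d', '8d', '7d', '6d', '5d', '4d', '3d', '2d'
--           , 'Ac', 'Kc', 'Qc', 'Jc', 'Tc', '9c', '8c', '7c', '6c', '5c', '4c', '3c', '2c']
--
--     return desk
--
-- def deck_list_result(input_desk):
--     """
--     Input  : list of desk
--             ['Qs', 'Js', 'Ts', '5s', '4s', '3s', '2s', 'Th', '6d', 'Qc', 'Jc', '8c', '2c'
--             , 'Jh', '9h', '7h', '5h', '4h', '3h', 'Kd', '7d', '5d', '3d', '2d', '9c', '4c'
--             , '8s', '7s', 'Ah', '6h', '2h', 'Qd', 'Jd', 'Td', '4d', 'Ac', 'Tc', '7c', '5c'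
--             , 'As', 'Ks', '9s', '6s', 'Kh', 'Qh', '8h', 'Ad', '9d', '8d', 'Kc', '6c', '3c']
--
--     Output : [lost_card     -> []   or ['3c'] if have lost card
--              ,over_card]    -> []   or ['3c'] if have over card
--
--     lost_card ,over_card = deck_list_result(list_desk)
--     """
--     # Intitial variable
--     input_desk = input_desk
--     full_desk = generate_desk_list()
--     lost_card = []
--     over_card = []
--
--     # Checking by Looping full_desk
--     for i in full_desk:
--         if i in input_desk:
--             input_desk.remove(i)
--         else:
--             lost_card.append(i)
--
--     over_card = input_desk
--
--     return [lost_card ,over_card]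
-- ===== SOURCE B (Python) =====
-- def generate_desk_list():
--     desk = ['As', 'Ks', 'Qs', 'Js', 'Ts', '9s', '8s', '7s', '6s', '5s', '4s', '3s', '2s'
--           , 'Ah', 'Kh', 'Qh', 'Jh', 'Th', '9h', '8h', '7h', '6h', '5h', '4h', '3h', '2h'
--           , 'Ad', 'Kd', 'Qd', 'Jd', 'Td', '9d', '8d', '7d', '6d', '5d', '4d', '3d', '2d'
--           , 'Ac', 'Kc', 'Qc', 'Jc', 'Tc', '9c', '8c', '7c', '6c', '5c', '4c', '3c', '2c']
--     return desk
--
-- def deck_list_result(input_desk):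
--     full_desk = generate_desk_list()
--     full_set = set(full_desk)
--     input_set = set(input_desk)
--     # lost cards: full-deck cards that never appear in the input
--     lost_card = [c for c in full_desk if c not in input_set]
--     # drop the FIRST occurrence of each valid (full-deck) card; everything
--     # else (duplicates, invalid strings) stays in original order.  Correct
--     # because the full deck has no duplicates, so A's repeated .remove(i)
--     # deletes exactly the first occurrence of each distinct deck card present.
--     seen = set()
--     over_card = []
--     for x in input_desk:
--         if x in full_set and x not in seen:
--             seen.add(x)
--         else:
--             over_card.append(x)
--     input_desk[:] = over_card  # mirror A's in-place mutation of the argument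
--     return [lost_card, input_desk]
-- ===== Notes on version B (the rewrite author's own statement) =====
-- stated objective: faster
-- what changed: Instead of A's 52 membership scans plus list.remove on a mutating list, B filters the full deck against a set of the input for lost cards and makes one forward pass over the input with a growing 'seen' set, dropping exactly the first occurrence of each valid card.
import Mathlib
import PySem

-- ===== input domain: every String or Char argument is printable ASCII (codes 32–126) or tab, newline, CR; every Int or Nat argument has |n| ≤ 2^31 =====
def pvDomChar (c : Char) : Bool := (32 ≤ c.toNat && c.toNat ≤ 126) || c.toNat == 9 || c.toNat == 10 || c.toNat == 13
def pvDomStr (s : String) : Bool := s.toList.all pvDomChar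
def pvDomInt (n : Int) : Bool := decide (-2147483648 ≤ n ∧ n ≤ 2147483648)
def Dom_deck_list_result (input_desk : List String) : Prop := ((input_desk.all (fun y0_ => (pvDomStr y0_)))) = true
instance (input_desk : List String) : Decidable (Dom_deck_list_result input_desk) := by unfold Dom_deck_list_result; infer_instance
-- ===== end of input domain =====

set_option maxRecDepth 4096


-- B replaces A's 52 membership scans + list.remove on a mutating list by a filter of the full
-- deck against a set of the input (lost cards) and one forward pass over the input with a
-- growing 'seen' set that drops the first occurrence of each valid card; objective: faster
-- (constant factor). Equivalence is about the RETURN value; both Pythons mutate the argument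
-- to the same final content.

-- ===== PORT A =====
def generate_desk_list : List String :=
  ["As", "Ks", "Qs", "Js", "Ts", "9s", "8s", "7s", "6s", "5s", "4s", "3s", "2s"
  , "Ah", "Kh", "Qh", "Jh", "Th", "9h", "8h", "7h", "6h", "5h", "4h", "3h", "2h"
  , "Ad", "Kd", "Qd", "Jd", "Td", "9d", "8d", "7d", "6d", "5d", "4d", "3d", "2d"
  , "Ac", "Kc", "Qc", "Jc", "Tc", "9c", "8c", "7c", "6c", "5c", "4c", "3c", "2c"]

def deck_list_result (input_desk : List String) : List (List String) :=
  let full_desk := generate_desk_list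
  -- for i in full_desk: if i in input_desk: input_desk.remove(i) else: lost_card.append(i)
  let st := full_desk.foldl
    (fun (st : List String × List String) i =>
      if st.1.contains i then ((PySem.List.remove? st.1 i).getD st.1, st.2)
      else (st.1, st.2 ++ [i]))
    (input_desk, ([] : List String))
  [st.2, st.1]

-- ===== PORT B =====
def deck_list_result_alt (input_desk : List String) : List (List String) :=
  let full_desk := generate_desk_list
  let full_set := PySem.Set.ofList full_desk
  let input_set := PySem.Set.ofList input_desk
  let lost_card := full_desk.filter (fun c => !(PySem.Set.contains input_set c))
  -- for x in input_desk: if x in full_set and x not in seen: seen.add(x) else: over_card.append(x)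
  let st := input_desk.foldl
    (fun (st : PySem.Set String × List String) x =>
      if PySem.Set.contains full_set x && !(PySem.Set.contains st.1 x)
      then (PySem.Set.add st.1 x, st.2)
      else (st.1, st.2 ++ [x]))
    (PySem.Set.empty, ([] : List String))
  [lost_card, st.2]

-- ===== PRECONDITION & SPEC =====
def Spec_deck_list_result (input_desk : List String) (out : List (List String)) : Prop := out = deck_list_result_alt input_desk
instance (input_desk : List String) (out : List (List String)) : Decidable (Spec_deck_list_result input_desk out) := by unfold Spec_deck_list_result; infer_instance

-- ===== CLAIM (what is proved, stated in full; the proofs are below) =====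
def Claim_equal_deck_list_result : Prop := ∀ (input_desk : List String), Dom_deck_list_result input_desk → Spec_deck_list_result input_desk (deck_list_result input_desk)

-- ===== LEMMAS AND PROOFS =====

-- 'drop the first occurrence of each member of S', as a recursion on the input
def skipGo : List String → List String → List String
  | [], _ => []
  | x :: t, S => if S.contains x then skipGo t (S.erase x) else x :: skipGo t S

theorem foldl_erase_nil (S : List String) :
    S.foldl (fun l c => l.erase c) [] = [] := by
  induction S with
  | nil => rfl
  | cons s S ih => simpa using ih

theorem foldl_erase_cons_mem (S : List String) (x : String) (hx : x ∈ S) :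
    ∀ t : List String, S.foldl (fun l c => l.erase c) (x :: t)
      = (S.erase x).foldl (fun l c => l.erase c) t := by
  induction S with
  | nil => cases hx
  | cons s S ih =>
    intro t
    by_cases hsx : s = x
    · subst hsx; simp [List.foldl_cons]
    · have hx' : x ∈ S := by
        rcases List.mem_cons.mp hx with h | h
        · exact absurd h.symm hsx
        · exact h
      have h1 : (x :: t).erase s = x :: t.erase s := by
        rw [List.erase_cons]
        simp [beq_iff_eq, Ne.symm hsx]
      have h2 : (s :: S).erase x = s :: S.erase x := by
        rw [List.erase_cons]
        simp [beq_iff_eq, hsx]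
      rw [List.foldl_cons, h1, ih hx', h2, List.foldl_cons]

theorem foldl_erase_cons_not_mem (S : List String) (x : String) (hx : x ∉ S) :
    ∀ t : List String, S.foldl (fun l c => l.erase c) (x :: t)
      = x :: S.foldl (fun l c => l.erase c) t := by
  induction S with
  | nil => intro t; rfl
  | cons s S ih =>
    intro t
    have hsx : s ≠ x := fun h => hx (by simp [h])
    have hx' : x ∉ S := fun h => hx (by simp [h])
    have h1 : (x :: t).erase s = x :: t.erase s := by
      rw [List.erase_cons]
      simp [beq_iff_eq, Ne.symm hsx]
    rw [List.foldl_cons, h1, ih hx', List.foldl_cons]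

theorem skipGo_eq_foldl_erase (xs : List String) :
    ∀ S : List String, skipGo xs S = S.foldl (fun l c => l.erase c) xs := by
  induction xs with
  | nil => intro S; simp [skipGo, foldl_erase_nil]
  | cons x t ih =>
    intro S
    by_cases hx : x ∈ S
    · rw [skipGo, if_pos (by simpa using hx), ih, foldl_erase_cons_mem S x hx]
    · rw [skipGo, if_neg (by simpa using hx), ih, foldl_erase_cons_not_mem S x hx]

-- characterisation of A's fold over a duplicate-free card list
theorem foldA_eq (cs : List String) (hcs : cs.Nodup) :
    ∀ (xs lost : List String),
      cs.foldl
        (fun (st : List String × List String) i =>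
          if st.1.contains i then ((PySem.List.remove? st.1 i).getD st.1, st.2)
          else (st.1, st.2 ++ [i]))
        (xs, lost)
      = ((cs.filter (fun c => xs.contains c)).foldl (fun l c => l.erase c) xs,
         lost ++ cs.filter (fun c => !(xs.contains c))) := by
  induction cs with
  | nil => intro xs lost; simp
  | cons i cs ih =>
    have hni : i ∉ cs := by simp [List.nodup_cons] at hcs; exact hcs.1
    have hcs' : cs.Nodup := by simp [List.nodup_cons] at hcs; exact hcs.2
    intro xs lost
    by_cases hi : i ∈ xs
    · have hc : xs.contains i = true := by simpa using hi
      have hr : (PySem.List.remove? xs i).getD xs = xs.erase i :=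
        by rw [PySem.List.remove?_eq_some_erase xs i hi, Option.getD_some]
      have hfilt : ∀ p : Bool → Bool,
          cs.filter (fun c => p ((xs.erase i).contains c)) = cs.filter (fun c => p (xs.contains c)) := by
        intro p
        apply List.filter_congr
        intro c hcmem
        have hne : c ≠ i := fun h => hni (h ▸ hcmem)
        have : c ∈ xs.erase i ↔ c ∈ xs := List.mem_erase_of_ne hne
        by_cases hcx : c ∈ xs
        · simp [hcx, this.mpr hcx]
        · simp [this, hcx]
      rw [List.foldl_cons]
      simp only [hc, if_true, hr]
      rw [ih hcs' (xs.erase i) lost]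
      rw [hfilt (fun b => b), hfilt (fun b => !b)]
      rw [List.filter_cons_of_pos (by simp [hi]),
          List.filter_cons_of_neg (by simp [hi])]
      rw [List.foldl_cons]
    · have hc : xs.contains i = false := by simpa using hi
      rw [List.foldl_cons]
      simp only [hc, Bool.false_eq_true, if_false]
      rw [ih hcs' xs (lost ++ [i])]
      rw [List.filter_cons_of_neg (by simp [hi]),
          List.filter_cons_of_pos (by simp [hi])]
      simp

theorem nodup_generate_desk_list : generate_desk_list.Nodup := by decide

-- B's pass with a growing 'seen' set equals the 'drop first occurrence of each member of S'
-- pass, for any S ≈ {c ∈ full deck | c ∉ seen} as far as the remaining input can see.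
theorem foldB_snd (xs : List String) :
    ∀ (s : PySem.Set String) (acc S : List String), S.Nodup →
      (∀ y ∈ xs, (y ∈ S ↔ y ∈ generate_desk_list ∧ y ∉ s)) →
      (xs.foldl
        (fun (st : PySem.Set String × List String) x =>
          if PySem.Set.contains (PySem.Set.ofList generate_desk_list) x && !(PySem.Set.contains st.1 x)
          then (PySem.Set.add st.1 x, st.2)
          else (st.1, st.2 ++ [x]))
        (s, acc)).2 = acc ++ skipGo xs S := by
  induction xs with
  | nil => intro s acc S _ _; simp [skipGo]
  | cons x t ih =>
    intro s acc S hS hinv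
    have hx := hinv x (by simp)
    by_cases hmem : x ∈ S
    · obtain ⟨hxfull, hxs⟩ := hx.mp hmem
      have hcond : (PySem.Set.contains (PySem.Set.ofList generate_desk_list) x
          && !(PySem.Set.contains s x)) = true := by
        simp [PySem.Set.contains, PySem.Set.mem_ofList, hxfull, hxs]
      rw [List.foldl_cons]
      simp only [hcond, if_true]
      rw [ih (PySem.Set.add s x) acc (S.erase x) (hS.erase x) ?_]
      · rw [skipGo, if_pos (by simpa using hmem)]
      · intro y hy
        rw [hS.mem_erase_iff, hinv y (by simp [hy]), PySem.Set.mem_add]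
        constructor
        · rintro ⟨hne, hf, hns⟩; exact ⟨hf, by tauto⟩
        · rintro ⟨hf, hn⟩
          exact ⟨fun h => hn (Or.inr h), hf, fun h => hn (Or.inl h)⟩
    · have hcond : (PySem.Set.contains (PySem.Set.ofList generate_desk_list) x
          && !(PySem.Set.contains s x)) = false := by
        have : ¬(x ∈ generate_desk_list ∧ x ∉ s) := fun h => hmem (hx.mpr h)
        by_cases hf : x ∈ generate_desk_list
        · have hxs : x ∈ s := by tauto
          simp [PySem.Set.contains, hxs]
        · simp [PySem.Set.contains, PySem.Set.mem_ofList, hf]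
      rw [List.foldl_cons]
      simp only [hcond, Bool.false_eq_true, if_false]
      rw [ih s (acc ++ [x]) S hS (fun y hy => hinv y (by simp [hy]))]
      rw [skipGo, if_neg (by simpa using hmem)]
      simp

theorem main_eq (input_desk : List String) :
    deck_list_result input_desk = deck_list_result_alt input_desk := by
  unfold deck_list_result deck_list_result_alt
  simp only []
  rw [foldA_eq generate_desk_list nodup_generate_desk_list input_desk []]
  have hlost : generate_desk_list.filter
      (fun c => !(PySem.Set.contains (PySem.Set.ofList input_desk) c))
      = generate_desk_list.filter (fun c => !(input_desk.contains c)) := by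
    apply List.filter_congr
    intro c _
    simp [PySem.Set.contains, PySem.Set.mem_ofList]
  have hS : (generate_desk_list.filter (fun c => input_desk.contains c)).Nodup :=
    nodup_generate_desk_list.filter _
  rw [hlost, foldB_snd input_desk PySem.Set.empty []
      (generate_desk_list.filter (fun c => input_desk.contains c)) hS ?_]
  · rw [skipGo_eq_foldl_erase]
    simp
  · intro y hy
    simp [List.mem_filter, PySem.Set.empty]
    intro _
    simpa using hy

-- ===== VERDICT (by name: the statement is the Claim_ definition above) =====
theorem deck_list_result_spec : Claim_equal_deck_list_result := by
  intro input_desk _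
  unfold Spec_deck_list_result
  exact main_eq input_desk
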